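-- pv_equiv track=rewrite | github.com/harukaeru/CompetitiveProgramming | abc198/D/main.py | repl
-- ===== SOURCE A (Python) =====
-- def repl(s, d):
--   r = 0
--   l = len(s)
--   k = 0
--   p = 1
--   while l > 0:
--     t = d[s[l - 1 - k]]
--     r += t * p
--     p *= 10
--     l -= 1
--   if t == 0:
--     return -1111111111111
--   return r
-- ===== SOURCE B (Python) =====
-- def repl(s, d):
--   r = 0
--   for c in s:
--     r = r * 10 + d[c]
--   if d[s[0]] == 0:
--     return -1111111111111
--   return r
-- ===== Notes on version B (the rewrite author's own statement) =====
-- stated objective: idiomatic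
-- what changed: Replaces the right-to-left index/power accumulation (r += d[s[l-1]]*p; p *= 10) with a left-to-right Horner pass (r = r*10 + d[c]) and checks the leading digit by looking up s[0] directly instead of via leftover loop state.
import Mathlib
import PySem

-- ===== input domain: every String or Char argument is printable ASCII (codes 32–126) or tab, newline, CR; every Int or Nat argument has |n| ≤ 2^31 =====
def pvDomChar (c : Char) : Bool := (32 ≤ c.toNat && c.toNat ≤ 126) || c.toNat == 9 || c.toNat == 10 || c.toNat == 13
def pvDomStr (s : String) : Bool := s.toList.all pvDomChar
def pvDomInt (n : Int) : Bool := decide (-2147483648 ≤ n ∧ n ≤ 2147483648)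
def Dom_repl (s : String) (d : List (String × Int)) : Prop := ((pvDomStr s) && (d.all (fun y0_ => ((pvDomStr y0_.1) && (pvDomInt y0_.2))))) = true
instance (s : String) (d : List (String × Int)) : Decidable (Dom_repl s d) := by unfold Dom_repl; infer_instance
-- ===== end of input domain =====

-- B replaces A's right-to-left power accumulation with a left-to-right Horner pass; equal on all inputs where A returns.

-- dict lookup d[c] for a character c (key is the 1-char string); total form, Pre_ guarantees the key exists
def pyLook (d : List (String × Int)) (c : Char) : Int :=
  (PySem.Dict.mk d).getD (String.singleton c) 0

-- ===== PORT A =====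
-- the while loop of A, walking the characters from the right (k is always 0): state (r, p, t)
def replLoopA (d : List (String × Int)) : List Char → Int → Int → Int → Int × Int × Int
  | [], r, p, t => (r, p, t)
  | c :: rest, r, p, _ => replLoopA d rest (r + pyLook d c * p) (p * 10) (pyLook d c)

def repl (s : String) (d : List (String × Int)) : Int :=
  let out := replLoopA d s.toList.reverse 0 1 0
  if out.2.2 = 0 then -1111111111111 else out.1

-- ===== PORT B =====
def repl_alt (s : String) (d : List (String × Int)) : Int :=
  let r := s.toList.foldl (fun r c => r * 10 + pyLook d c) 0
  if pyLook d (s.toList.headD ' ') = 0 then -1111111111111 else r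

-- ===== PRECONDITION & SPEC =====
-- A raises UnboundLocalError on the empty string and KeyError when a character of s is not a key of d
def Pre_repl (s : String) (d : List (String × Int)) : Prop :=
  s.toList ≠ [] ∧ (s.toList.all (fun c => ((PySem.Dict.mk d).get? (String.singleton c)).isSome)) = true
instance (s : String) (d : List (String × Int)) : Decidable (Pre_repl s d) := by unfold Pre_repl; infer_instance
def pvWitness_repl : String × (List (String × Int)) := ("7", [("7", 7)])

def Spec_repl (s : String) (d : List (String × Int)) (out : Int) : Prop := out = repl_alt s d
instance (s : String) (d : List (String × Int)) (out : Int) : Decidable (Spec_repl s d out) := by unfold Spec_repl; infer_instance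

-- ===== CLAIM (what is proved, stated in full; the proofs are below) =====
def Claim_equal_repl : Prop := ∀ (s : String) (d : List (String × Int)), Dom_repl s d → Pre_repl s d → Spec_repl s d (repl s d)

-- ===== LEMMAS AND PROOFS =====
-- (verdict theorem repl_spec is at the bottom)

-- value of a character list read with increasing powers of 10 (A's traversal order)
def lowV (d : List (String × Int)) (cs : List Char) : Int :=
  cs.foldr (fun c acc => pyLook d c + 10 * acc) 0

theorem replLoopA_fst (d : List (String × Int)) :
    ∀ (cs : List Char) (r p t : Int), (replLoopA d cs r p t).1 = r + p * lowV d cs := by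
  intro cs
  induction cs with
  | nil => intro r p t; simp [replLoopA, lowV]
  | cons c rest ih =>
      intro r p t
      simp only [replLoopA, lowV, List.foldr] at *
      rw [ih]
      ring

theorem replLoopA_t (d : List (String × Int)) :
    ∀ (cs : List Char) (r p t : Int),
      (replLoopA d cs r p t).2.2 = cs.foldl (fun _ c => pyLook d c) t := by
  intro cs
  induction cs with
  | nil => intro r p t; simp [replLoopA]
  | cons c rest ih => intro r p t; simp [replLoopA, ih]

theorem lowV_append (d : List (String × Int)) (xs ys : List Char) :
    lowV d (xs ++ ys) = lowV d xs + 10 ^ xs.length * lowV d ys := by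
  induction xs with
  | nil => simp [lowV]
  | cons c rest ih =>
      simp only [lowV, List.foldr, List.cons_append, List.length_cons] at *
      rw [ih]
      ring

theorem horner_acc (d : List (String × Int)) :
    ∀ (cs : List Char) (a : Int),
      cs.foldl (fun r c => r * 10 + pyLook d c) a
        = a * 10 ^ cs.length + cs.foldl (fun r c => r * 10 + pyLook d c) 0 := by
  intro cs
  induction cs with
  | nil => intro a; simp
  | cons c rest ih =>
      intro a
      simp only [List.foldl, List.length_cons]
      rw [ih (a * 10 + pyLook d c), ih (0 * 10 + pyLook d c)]
      ring

theorem lowV_reverse (d : List (String × Int)) (cs : List Char) :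
    lowV d cs.reverse = cs.foldl (fun r c => r * 10 + pyLook d c) 0 := by
  induction cs with
  | nil => simp [lowV]
  | cons c rest ih =>
      simp only [List.reverse_cons, List.foldl]
      rw [lowV_append, ih, horner_acc d rest (0 * 10 + pyLook d c)]
      simp [lowV]
      ring

theorem foldl_last_char (d : List (String × Int)) (xs : List Char) (c : Char) (t : Int) :
    (xs ++ [c]).foldl (fun _ x => pyLook d x) t = pyLook d c := by
  simp [List.foldl_append]

theorem repl_spec : Claim_equal_repl := by
  intro s d _ hpre
  unfold Spec_repl repl repl_alt
  obtain ⟨hne, -⟩ := hpre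
  cases hcs : s.toList with
  | nil => exact absurd hcs hne
  | cons c rest =>
      simp only [List.reverse_cons]
      rw [replLoopA_t, replLoopA_fst, foldl_last_char, lowV_append, lowV_reverse]
      simp only [lowV, List.foldr, List.length_reverse, List.headD_cons]
      split_ifs with h
      · rfl
      · simp only [List.foldl]
        rw [horner_acc d rest (0 * 10 + pyLook d c)]
        ring
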